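-- pv_equiv track=rewrite | github.com/Pratz1337/BengaluruHack | Whatsapp_connection/app.py | format_whatsapp_text
-- ===== SOURCE A (Python) =====
-- def format_whatsapp_text(text: str) -> str:
--     """Format text for WhatsApp display with proper styling"""
--     lines = []
--     current_section = []
--
--     # Split text into lines and process each line
--     for line in text.split('\n'):
--         line = line.strip()
--
--         # Skip empty lines and decorative lines
--         if not line or line.startswith('===') or line.startswith('---'):
--             if current_section:
--                 lines.append('\n'.join(current_section))
--                 current_section = []
--             continue
--
--         # Format headings
--         if line.startswith('#'):
--             if current_section:
--                 lines.append('\n'.join(current_section))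
--                 current_section = []
--             line = line.lstrip('#').strip()
--             lines.append(f"\n*{line}*\n")
--             continue
--
--         # Format bullet points
--         if line.startswith('*') or line.startswith('-'):
--             line = f"• {line.lstrip('*-').strip()}"
--
--         # Format bold text
--         line = line.replace('**', '*')
--
--         current_section.append(line)
--
--     if current_section:
--         lines.append('\n'.join(current_section))
--
--     # Join sections with proper spacing
--     formatted_text = '\n\n'.join(line for line in lines if line.strip())
--     return formatted_text
-- ===== SOURCE B (Python) =====
-- def _classify(raw):
--     """Map a raw line to ('B', None), ('H', title) or ('C', content)."""
--     s = raw.strip()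
--     if not s or s.startswith('===') or s.startswith('---'):
--         return ('B', None)
--     if s.startswith('#'):
--         return ('H', s.lstrip('#').strip())
--     if s.startswith('*') or s.startswith('-'):
--         s = f"• {s.lstrip('*-').strip()}"
--     return ('C', s.replace('**', '*'))
--
--
-- def format_whatsapp_text(text: str) -> str:
--     """Format text for WhatsApp display with proper styling"""
--     cls = [_classify(l) for l in text.split('\n')]
--     entries = []
--     i, n = 0, len(cls)
--     while i < n:
--         kind, val = cls[i]
--         if kind == 'B':
--             i += 1
--         elif kind == 'H':
--             entries.append(f"\n*{val}*\n")
--             i += 1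
--         else:
--             j = i
--             while j < n and cls[j][0] == 'C':
--                 j += 1
--             entries.append('\n'.join(c for _, c in cls[i:j]))
--             i = j
--     return '\n\n'.join(e for e in entries if e.strip())
-- ===== Notes on version B (the rewrite author's own statement) =====
-- stated objective: alternative
-- what changed: Replaces A's single pass with an inline accumulator-and-flush by a two-stage classify-then-segment structure: each line is first mapped to a class (boundary/heading/content), then a second walk groups maximal runs of content lines into blocks and emits headings as their own entries.
import Mathlib
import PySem

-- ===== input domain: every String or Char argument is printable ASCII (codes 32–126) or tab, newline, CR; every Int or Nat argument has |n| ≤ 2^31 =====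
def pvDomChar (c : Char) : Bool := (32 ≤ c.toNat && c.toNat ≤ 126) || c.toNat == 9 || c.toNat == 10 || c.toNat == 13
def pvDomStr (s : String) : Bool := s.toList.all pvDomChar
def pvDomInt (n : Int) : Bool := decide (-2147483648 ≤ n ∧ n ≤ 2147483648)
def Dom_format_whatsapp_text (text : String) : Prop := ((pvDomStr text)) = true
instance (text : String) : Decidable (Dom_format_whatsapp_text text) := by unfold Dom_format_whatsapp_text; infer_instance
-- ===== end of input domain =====

-- B replaces A's inline accumulator-and-flush single pass by a classify-then-segment
-- two-stage structure (objective: alternative decomposition, same cost).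

-- shared helper: exact port of Python's str.lstrip(chars) — drop leading chars in the set
def pyLstripChars (cs chars : List Char) : List Char := cs.dropWhile (chars.contains ·)

-- ===== PORT A =====
-- one iteration of A's `for line in text.split('\n')` loop; state = (lines, current_section)
def fwStepA (st : List (List Char) × List (List Char)) (raw : List Char) :
    List (List Char) × List (List Char) :=
  let lines := st.1
  let cur := st.2
  let line := PySem.Chars.strip raw
  if line = [] || PySem.Chars.startswith line "===".toList || PySem.Chars.startswith line "---".toList then
    if cur ≠ [] then (lines ++ [PySem.Chars.join ['\n'] cur], []) else (lines, cur)
  else if PySem.Chars.startswith line "#".toList then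
    let lines := if cur ≠ [] then lines ++ [PySem.Chars.join ['\n'] cur] else lines
    let t := PySem.Chars.strip (pyLstripChars line ['#'])
    (lines ++ [['\n', '*'] ++ t ++ ['*', '\n']], [])
  else
    let line := if PySem.Chars.startswith line "*".toList || PySem.Chars.startswith line "-".toList then
        "• ".toList ++ PySem.Chars.strip (pyLstripChars line ['*', '-'])
      else line
    let line := PySem.Chars.replace line "**".toList "*".toList
    (lines, cur ++ [line])

def format_whatsapp_text (text : String) : String :=
  let st := (PySem.Chars.splitOn text.toList ['\n']).foldl fwStepA ([], [])
  let lines := if st.2 ≠ [] then st.1 ++ [PySem.Chars.join ['\n'] st.2] else st.1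
  String.mk (PySem.Chars.join ['\n', '\n'] (lines.filter (fun l => !(PySem.Chars.strip l).isEmpty)))

-- ===== PORT B =====
-- a classified line: boundary / heading title / content text
inductive FwCls where
  | bound : FwCls
  | head : List Char → FwCls
  | content : List Char → FwCls
deriving DecidableEq, Repr

-- port of Source B's _classify
def fwClassify (raw : List Char) : FwCls :=
  let s := PySem.Chars.strip raw
  if s = [] || PySem.Chars.startswith s "===".toList || PySem.Chars.startswith s "---".toList then
    .bound
  else if PySem.Chars.startswith s "#".toList then
    .head (PySem.Chars.strip (pyLstripChars s ['#']))
  else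
    let s := if PySem.Chars.startswith s "*".toList || PySem.Chars.startswith s "-".toList then
        "• ".toList ++ PySem.Chars.strip (pyLstripChars s ['*', '-'])
      else s
    .content (PySem.Chars.replace s "**".toList "*".toList)

-- the inner `while j < n and cls[j][0] == 'C'` scan: maximal run of content lines and the rest
def fwTakeContent : List FwCls → List (List Char) × List FwCls
  | .content c :: rest =>
      let p := fwTakeContent rest
      (c :: p.1, p.2)
  | l => ([], l)

theorem fwTakeContent_len (l : List FwCls) : (fwTakeContent l).2.length ≤ l.length := by
  induction l with
  | nil => simp [fwTakeContent]
  | cons x rest ih => cases x <;> simp [fwTakeContent] <;> omega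

-- the outer while-loop of Source B: walk classified lines, grouping content runs
def fwGroup : List FwCls → List (List Char)
  | [] => []
  | .bound :: rest => fwGroup rest
  | .head t :: rest => (['\n', '*'] ++ t ++ ['*', '\n']) :: fwGroup rest
  | .content c :: rest =>
      let p := fwTakeContent rest
      PySem.Chars.join ['\n'] (c :: p.1) :: fwGroup p.2
termination_by l => l.length
decreasing_by
  · simp
  · simp
  · have := fwTakeContent_len rest; simp; omega

def format_whatsapp_text_alt (text : String) : String :=
  let cls := (PySem.Chars.splitOn text.toList ['\n']).map fwClassify
  let entries := fwGroup cls
  String.mk (PySem.Chars.join ['\n', '\n'] (entries.filter (fun e => !(PySem.Chars.strip e).isEmpty)))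

-- ===== PRECONDITION & SPEC =====
def Spec_format_whatsapp_text (text : String) (out : String) : Prop := out = format_whatsapp_text_alt text
instance (text : String) (out : String) : Decidable (Spec_format_whatsapp_text text out) := by unfold Spec_format_whatsapp_text; infer_instance

-- ===== CLAIM (what is proved, stated in full; the proofs are below) =====
def Claim_equal_format_whatsapp_text : Prop := ∀ (text : String), Dom_format_whatsapp_text text → Spec_format_whatsapp_text text (format_whatsapp_text text)

-- ===== LEMMAS AND PROOFS =====

-- A's flush: `if current_section: lines.append('\n'.join(current_section))`
def fwFlush (cur : List (List Char)) : List (List Char) :=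
  if cur = [] then [] else [PySem.Chars.join ['\n'] cur]

-- A's step, rephrased on the classification of the line
def fwStepC (st : List (List Char) × List (List Char)) (k : FwCls) :
    List (List Char) × List (List Char) :=
  match k with
  | .bound => (st.1 ++ fwFlush st.2, [])
  | .head t => (st.1 ++ fwFlush st.2 ++ [['\n', '*'] ++ t ++ ['*', '\n']], [])
  | .content c => (st.1, st.2 ++ [c])

theorem fwStepA_eq_stepC (st : List (List Char) × List (List Char)) (raw : List Char) :
    fwStepA st raw = fwStepC st (fwClassify raw) := by
  by_cases h1 : (PySem.Chars.strip raw = [] ∨ PySem.Chars.startswith (PySem.Chars.strip raw) ['=', '=', '='] = true) ∨ PySem.Chars.startswith (PySem.Chars.strip raw) ['-', '-', '-'] = true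
  all_goals by_cases h2 : PySem.Chars.startswith (PySem.Chars.strip raw) ['#'] = true
  all_goals by_cases h3 : st.2 = []
  all_goals simp [fwStepA, fwClassify, fwStepC, fwFlush, h1, h2, h3]

theorem fwGroup_nil : fwGroup [] = [] := by rw [fwGroup]
theorem fwGroup_bound (r : List FwCls) : fwGroup (.bound :: r) = fwGroup r := by rw [fwGroup]
theorem fwGroup_head (t : List Char) (r : List FwCls) :
    fwGroup (.head t :: r) = (['\n', '*'] ++ t ++ ['*', '\n']) :: fwGroup r := by rw [fwGroup]
theorem fwGroup_content (c : List Char) (r : List FwCls) :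
    fwGroup (.content c :: r)
      = PySem.Chars.join ['\n'] (c :: (fwTakeContent r).1) :: fwGroup (fwTakeContent r).2 := by
  rw [fwGroup]

-- the effect of A's loop from an arbitrary state, expressed recursively
def fwRun (cur : List (List Char)) : List FwCls → List (List Char)
  | [] => fwFlush cur
  | .bound :: r => fwFlush cur ++ fwRun [] r
  | .head t :: r => fwFlush cur ++ [['\n', '*'] ++ t ++ ['*', '\n']] ++ fwRun [] r
  | .content c :: r => fwRun (cur ++ [c]) r

theorem foldl_stepC (L : List FwCls) : ∀ (lines cur : List (List Char)),
    (L.foldl fwStepC (lines, cur)).1 ++ fwFlush (L.foldl fwStepC (lines, cur)).2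
      = lines ++ fwRun cur L := by
  induction L with
  | nil => intro lines cur; simp [fwRun]
  | cons k r ih =>
    intro lines cur
    cases k <;> simp [List.foldl_cons, fwStepC, fwRun, ih]

theorem fwRun_eq_group (L : List FwCls) : ∀ (cur : List (List Char)),
    fwRun cur L = (if cur = [] then fwGroup L
      else PySem.Chars.join ['\n'] (cur ++ (fwTakeContent L).1) :: fwGroup (fwTakeContent L).2) := by
  induction L with
  | nil =>
    intro cur
    by_cases h : cur = [] <;> simp [fwRun, fwFlush, fwTakeContent, fwGroup_nil, h]
  | cons k r ih =>
    intro cur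
    cases k with
    | bound =>
      by_cases h : cur = [] <;>
        simp [fwRun, fwFlush, fwTakeContent, fwGroup_bound, h, ih []]
    | head t =>
      by_cases h : cur = [] <;>
        simp [fwRun, fwFlush, fwTakeContent, fwGroup_head, h, ih []]
    | content c =>
      by_cases h : cur = []
      · subst h
        simp [fwRun, ih [c], fwGroup_content]
      · have hne : cur ++ [c] ≠ [] := by simp
        simp [fwRun, ih (cur ++ [c]), h, hne, fwTakeContent]

theorem foldl_fwStepA (raws : List (List Char)) :
    ∀ st, raws.foldl fwStepA st = (raws.map fwClassify).foldl fwStepC st := by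
  induction raws with
  | nil => intro st; rfl
  | cons a r ih => intro st; simp [List.foldl_cons, fwStepA_eq_stepC, ih]

-- ===== VERDICT (by name: the statement is the Claim_ definition above) =====
theorem format_whatsapp_text_spec : Claim_equal_format_whatsapp_text := by
  intro text _
  show format_whatsapp_text text = format_whatsapp_text_alt text
  have h := foldl_stepC ((PySem.Chars.splitOn text.toList ['\n']).map fwClassify) [] []
  rw [fwRun_eq_group] at h
  simp only [List.nil_append] at h
  have hfin : ∀ st : List (List Char) × List (List Char),
      (if st.2 ≠ [] then st.1 ++ [PySem.Chars.join ['\n'] st.2] else st.1) = st.1 ++ fwFlush st.2 := by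
    intro st; unfold fwFlush; by_cases h2 : st.2 = [] <;> simp [h2]
  simp only [format_whatsapp_text, format_whatsapp_text_alt, foldl_fwStepA, hfin]
  rw [h]
  simp only [if_true]
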